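-- pv_equiv track=rewrite | github.com/dylandogdev/benfordslaw | app/utils.py | get_occurences_by_first_digit
-- ===== SOURCE A (Python) =====
-- def get_occurences_by_first_digit(values):
--     observed = [0, 0, 0, 0, 0, 0, 0, 0, 0]
--     for i in range(0, len(values)):
--         num = int(str(values[i][0]))
--         if num == 1:
--             observed[0] += 1
--         elif num == 2:
--             observed[1] += 1
--         elif num == 3:
--             observed[2] += 1
--         elif num == 4:
--             observed[3] += 1
--         elif num == 5:
--             observed[4] += 1
--         elif num == 6:
--             observed[5] += 1
--         elif num == 7:
--             observed[6] += 1
--         elif num == 8: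
--             observed[7] += 1
--         elif num == 9:
--             observed[8] += 1
--         elif num == 0:
--              continue
--     return observed
-- ===== SOURCE B (Python) =====
-- def get_occurences_by_first_digit(values):
--     digits = [int(str(v[0])) for v in values]
--     return [digits.count(d) for d in range(1, 10)]
-- ===== Notes on version B (the rewrite author's own statement) =====
-- stated objective: alternative
-- what changed: Replaces A's single accumulator pass with nine if/elif-updated slots by a staged pipeline: first materialise the list of leading digits, then produce each answer entry by an independent list.count scan over that list.
import Mathlib
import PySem

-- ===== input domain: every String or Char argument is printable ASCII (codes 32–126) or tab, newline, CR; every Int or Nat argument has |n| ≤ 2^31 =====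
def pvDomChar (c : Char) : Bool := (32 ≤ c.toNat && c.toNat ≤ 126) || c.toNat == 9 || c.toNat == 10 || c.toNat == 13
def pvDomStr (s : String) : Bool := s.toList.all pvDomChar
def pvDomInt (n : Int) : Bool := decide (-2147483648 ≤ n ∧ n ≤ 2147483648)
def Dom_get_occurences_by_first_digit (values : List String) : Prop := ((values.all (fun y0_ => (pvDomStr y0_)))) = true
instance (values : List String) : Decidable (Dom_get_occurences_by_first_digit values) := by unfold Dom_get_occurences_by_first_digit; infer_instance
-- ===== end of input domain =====

-- B restructures A's accumulator loop into a staged pipeline: materialise the list of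
-- leading digits, then read off each of the nine answers with an independent list.count
-- scan (alternative decomposition, same cost).


-- ===== PORT A =====
-- literal transliteration of A: for i in range(0, len(values)): num = int(str(values[i][0]));
-- then the if/elif chain incrementing the fixed slot explicitly; num == 0 falls through.
def get_occurences_by_first_digit (values : List String) : List Int :=
  let observed : List Int := [0, 0, 0, 0, 0, 0, 0, 0, 0]
  (PySem.List.pyRange 0 (values.length : Int) 1).foldl (fun observed i =>
    match (PySem.List.pyGet? values i).bind (fun v => PySem.Str.pyGet? v 0) with
    | none => observed  -- IndexError (unreachable for i from range / excluded by Pre_)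
    | some c =>
      match PySem.Int.ofChars? [c] with  -- int(str(values[i][0])); str of a 1-char string is itself
      | none => observed  -- ValueError: excluded by Pre_
      | some num =>
        if num = 1 then observed.set 0 (observed.getD 0 0 + 1)
        else if num = 2 then observed.set 1 (observed.getD 1 0 + 1)
        else if num = 3 then observed.set 2 (observed.getD 2 0 + 1)
        else if num = 4 then observed.set 3 (observed.getD 3 0 + 1)
        else if num = 5 then observed.set 4 (observed.getD 4 0 + 1)
        else if num = 6 then observed.set 5 (observed.getD 5 0 + 1)
        else if num = 7 then observed.set 6 (observed.getD 6 0 + 1)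
        else if num = 8 then observed.set 7 (observed.getD 7 0 + 1)
        else if num = 9 then observed.set 8 (observed.getD 8 0 + 1)
        else observed) observed

-- ===== PORT B =====
-- literal transliteration of B: digits = [int(str(v[0])) for v in values];
-- return [digits.count(d) for d in range(1, 10)].
def get_occurences_by_first_digit_alt (values : List String) : List Int :=
  let digits : List Int := values.filterMap (fun v =>
    (PySem.Str.pyGet? v 0).bind (fun c => PySem.Int.ofChars? [c]))  -- failure = exception, excluded by Pre_
  (PySem.List.pyRange 1 10 1).map (fun d => PySem.List.count digits d)

-- ===== PRECONDITION & SPEC =====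
-- Pre_: every value is nonempty and starts with an ASCII digit — exactly the inputs on
-- which Python A returns (otherwise int(str(v[0])) raises ValueError, or v[0] IndexError).
def Pre_get_occurences_by_first_digit (values : List String) : Prop :=
  ∀ s ∈ values, s.toList.head? ∈ ['0','1','2','3','4','5','6','7','8','9'].map some
instance (values : List String) : Decidable (Pre_get_occurences_by_first_digit values) := by
  unfold Pre_get_occurences_by_first_digit; infer_instance
def pvWitness_get_occurences_by_first_digit : List String := ["123", "42", "9", "07x"]

def Spec_get_occurences_by_first_digit (values : List String) (out : List Int) : Prop := out = get_occurences_by_first_digit_alt values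
instance (values : List String) (out : List Int) : Decidable (Spec_get_occurences_by_first_digit values out) := by unfold Spec_get_occurences_by_first_digit; infer_instance

-- ===== CLAIM (what is proved, stated in full; the proofs are below) =====
def Claim_equal_get_occurences_by_first_digit : Prop := ∀ (values : List String), Dom_get_occurences_by_first_digit values → Pre_get_occurences_by_first_digit values → Spec_get_occurences_by_first_digit values (get_occurences_by_first_digit values)

-- ===== LEMMAS AND PROOFS =====

-- parse of one element: int(str(v[0]))
def pvDig (v : String) : Option Int :=
  (PySem.Str.pyGet? v 0).bind (fun c => PySem.Int.ofChars? [c])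

-- A's loop body as a function of the element values[i] (for the index→element conversion)
def pvStepA (observed : List Int) (v : String) : List Int :=
  match pvDig v with
  | none => observed
  | some num =>
    if num = 1 then observed.set 0 (observed.getD 0 0 + 1)
    else if num = 2 then observed.set 1 (observed.getD 1 0 + 1)
    else if num = 3 then observed.set 2 (observed.getD 2 0 + 1)
    else if num = 4 then observed.set 3 (observed.getD 3 0 + 1)
    else if num = 5 then observed.set 4 (observed.getD 4 0 + 1)
    else if num = 6 then observed.set 5 (observed.getD 5 0 + 1)
    else if num = 7 then observed.set 6 (observed.getD 6 0 + 1)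
    else if num = 8 then observed.set 7 (observed.getD 7 0 + 1)
    else if num = 9 then observed.set 8 (observed.getD 8 0 + 1)
    else observed

theorem pv_range19 : PySem.List.pyRange 1 10 1 = [1,2,3,4,5,6,7,8,9] := by decide

-- A's index loop is the element-wise fold of pvStepA
theorem pvA_eq_foldl (values : List String) :
    get_occurences_by_first_digit values = values.foldl pvStepA [0,0,0,0,0,0,0,0,0] := by
  unfold get_occurences_by_first_digit
  have h := PySem.List.foldl_pyRange_pyGetD' (xs := values) (d := "")
      (f := pvStepA) (init := ([0,0,0,0,0,0,0,0,0] : List Int)) (a := 0) (by norm_num)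
  simp only [Int.toNat_zero, List.drop_zero] at h
  rw [← h]
  apply PySem.List.foldl_congr_mem
  intro acc i hi
  have hmem := (PySem.List.mem_pyRange_one).1 hi
  have h0 : 0 ≤ i := hmem.1
  have hlt : i < (values.length : Int) := hmem.2
  obtain ⟨x, hx⟩ : ∃ x, PySem.List.pyGet? values i = some x := by
    rw [PySem.List.pyGet?_eq_some_getElem (h0 := h0) (h1 := hlt)]
    exact ⟨_, rfl⟩
  have hxD : PySem.List.pyGetD values i "" = x := by
    simp [PySem.List.pyGetD, hx]
  rw [hx, hxD]
  show (match (some x).bind (fun v => PySem.Str.pyGet? v 0) with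
    | none => acc
    | some c =>
      match PySem.Int.ofChars? [c] with
      | none => acc
      | some num =>
        if num = 1 then acc.set 0 (acc.getD 0 0 + 1)
        else if num = 2 then acc.set 1 (acc.getD 1 0 + 1)
        else if num = 3 then acc.set 2 (acc.getD 2 0 + 1)
        else if num = 4 then acc.set 3 (acc.getD 3 0 + 1)
        else if num = 5 then acc.set 4 (acc.getD 4 0 + 1)
        else if num = 6 then acc.set 5 (acc.getD 5 0 + 1)
        else if num = 7 then acc.set 6 (acc.getD 6 0 + 1)
        else if num = 8 then acc.set 7 (acc.getD 7 0 + 1)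
        else if num = 9 then acc.set 8 (acc.getD 8 0 + 1)
        else acc) = pvStepA acc x
  simp only [pvStepA, pvDig, PySem.Str.pyGet?, PySem.Chars.pyGet?_eq_listPyGet?]
  cases hc : PySem.List.pyGet? x.toList 0 <;> simp [hc]

-- loop invariant: starting from readings of f at digits 1..9, A's fold ends at
-- f d plus the count of d among the parsed leading digits
theorem pv_inv : ∀ (vs : List String) (f : Int → Int),
    (∀ s ∈ vs, s.toList.head? ∈ ['0','1','2','3','4','5','6','7','8','9'].map some) →
    vs.foldl pvStepA ((PySem.List.pyRange 1 10 1).map f) =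
      (PySem.List.pyRange 1 10 1).map
        (fun d => f d + ((vs.filterMap pvDig).count d : Int)) := by
  intro vs
  induction vs with
  | nil => intro f _; simp
  | cons s vs ih =>
    intro f hpre
    have hhd := hpre s (List.mem_cons_self ..)
    have htl : ∀ t ∈ vs, t.toList.head? ∈ ['0','1','2','3','4','5','6','7','8','9'].map some :=
      fun t ht => hpre t (List.mem_cons_of_mem _ ht)
    simp only [List.map, List.mem_cons, List.not_mem_nil, or_false] at hhd
    have hget : ∀ c0 rest, s.toList = c0 :: rest → pvDig s = PySem.Int.ofChars? [c0] := by
      intro c0 rest hs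
      simp [pvDig, PySem.Str.pyGet?, hs]
    have hnum : ∃ num : Int, pvDig s = some num ∧
        (num = 0 ∨ num = 1 ∨ num = 2 ∨ num = 3 ∨ num = 4 ∨ num = 5 ∨ num = 6 ∨ num = 7 ∨
         num = 8 ∨ num = 9) := by
      rcases hhd with h|h|h|h|h|h|h|h|h|h
      all_goals obtain ⟨rest, hs⟩ := List.head?_eq_some_iff.mp h
      · exact ⟨0, by rw [hget _ _ hs]; decide, by norm_num⟩
      · exact ⟨1, by rw [hget _ _ hs]; decide, by norm_num⟩
      · exact ⟨2, by rw [hget _ _ hs]; decide, by norm_num⟩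
      · exact ⟨3, by rw [hget _ _ hs]; decide, by norm_num⟩
      · exact ⟨4, by rw [hget _ _ hs]; decide, by norm_num⟩
      · exact ⟨5, by rw [hget _ _ hs]; decide, by norm_num⟩
      · exact ⟨6, by rw [hget _ _ hs]; decide, by norm_num⟩
      · exact ⟨7, by rw [hget _ _ hs]; decide, by norm_num⟩
      · exact ⟨8, by rw [hget _ _ hs]; decide, by norm_num⟩
      · exact ⟨9, by rw [hget _ _ hs]; decide, by norm_num⟩
    obtain ⟨num, hdig, hrange⟩ := hnum
    rw [List.foldl_cons]
    have hstep : pvStepA ((PySem.List.pyRange 1 10 1).map f) s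
        = (PySem.List.pyRange 1 10 1).map (fun d => if num = d then f d + 1 else f d) := by
      rcases hrange with rfl|rfl|rfl|rfl|rfl|rfl|rfl|rfl|rfl|rfl <;>
        simp [pvStepA, hdig, pv_range19]
    rw [hstep, ih _ htl]
    rcases hrange with rfl|rfl|rfl|rfl|rfl|rfl|rfl|rfl|rfl|rfl <;>
      simp [pv_range19, hdig, List.count_cons] <;> omega

theorem pv_main : ∀ (values : List String), Pre_get_occurences_by_first_digit values →
    get_occurences_by_first_digit values = get_occurences_by_first_digit_alt values := by
  intro values hpre
  rw [pvA_eq_foldl]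
  unfold get_occurences_by_first_digit_alt
  have h := pv_inv values (fun _ => 0) hpre
  simp only at h
  rw [show ([0,0,0,0,0,0,0,0,0] : List Int) = (PySem.List.pyRange 1 10 1).map (fun _ => (0:Int))
      from by decide, h]
  simp [PySem.List.count_eq, pvDig]

-- ===== VERDICT (by name: the statement is the Claim_ definition above) =====
theorem get_occurences_by_first_digit_spec : Claim_equal_get_occurences_by_first_digit := by
  intro values _ hpre
  exact pv_main values hpre
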